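-- pv_equiv track=rewrite | github.com/arch1904/Python_Programs | mom_and_dad_problem.py | mom_and_dad
-- ===== SOURCE A (Python) =====
-- def mom_and_dad(string):
--     """
--     Given a string, RETURN True if the number of appearnces of 'mom' and 'dad' are the same.
--
--     >>> mom_and_dad('momdad')
--     True
--     >>> mom_and_dad('momomdad')
--     False
--     >>> mom_and_dad('mom091213aiomomdadmomoomomomdadadfishsdadandwich')
--     False
--     >>> mom_and_dad('momomdadad')
--     True
--     """
--     # Your code goes here!
--     dad_count=0
--     mom_count=0
--     for i in range(0,len(string)-2):
--         if string[i]+string[i+1]+string[i+2]=="mom":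
--             mom_count+=1
--         elif string[i]+string[i+1]+string[i+2]=="dad":
--             dad_count+=1
--     if dad_count==mom_count:
--         return True
--     else:
--         return False
-- ===== SOURCE B (Python) =====
-- def mom_and_dad(string):
--     def count(sub):
--         n = 0
--         i = string.find(sub)
--         while i != -1:
--             n += 1
--             i = string.find(sub, i + 1)
--         return n
--     return count('mom') == count('dad')
-- ===== Notes on version B (the rewrite author's own statement) =====
-- stated objective: faster
-- what changed: Replaces the per-index three-character window scan with repeated str.find calls that jump directly from one overlapping occurrence of each pattern to the next (restarting the search at match position + 1), counting the two patterns separately and comparing the counts.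
import Mathlib
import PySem

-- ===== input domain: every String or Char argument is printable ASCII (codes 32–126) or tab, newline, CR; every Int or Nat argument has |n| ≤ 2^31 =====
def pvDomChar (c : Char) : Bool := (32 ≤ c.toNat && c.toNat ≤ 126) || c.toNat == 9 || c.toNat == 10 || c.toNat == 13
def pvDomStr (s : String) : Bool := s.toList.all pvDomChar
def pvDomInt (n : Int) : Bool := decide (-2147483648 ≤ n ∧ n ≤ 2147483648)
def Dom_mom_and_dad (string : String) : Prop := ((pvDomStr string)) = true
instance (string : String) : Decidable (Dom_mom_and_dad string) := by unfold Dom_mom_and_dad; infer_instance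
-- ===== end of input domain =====

-- B replaces A's per-index three-character window scan by repeated str.find jumps from one
-- overlapping occurrence to the next (alternative algorithm, same cost class).

-- ===== PORT A =====
-- literal port of A: i in range(0, len-2); window built by concatenating string[i]+string[i+1]+string[i+2];
-- acc.1 = dad_count, acc.2 = mom_count
def mom_and_dad (string : String) : Bool :=
  let counts : Int × Int :=
    (PySem.List.pyRange 0 (PySem.Str.len string - 2) 1).foldl
      (fun (acc : Int × Int) i =>
        let w := (PySem.Str.pyGet? string i).toList ++ (PySem.Str.pyGet? string (i + 1)).toList
          ++ (PySem.Str.pyGet? string (i + 2)).toList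
        if w = ['m', 'o', 'm'] then (acc.1, acc.2 + 1)
        else if w = ['d', 'a', 'd'] then (acc.1 + 1, acc.2)
        else acc)
      ((0 : Int), (0 : Int))
  if counts.1 = counts.2 then true else false

-- ===== PORT B =====
-- the while-loop of B's count(): repeated string.find(sub, i+1); the fuel argument only makes the
-- recursion total (the loop runs at most len(string)+1 times, proved in pv_loop_counts below)
def pvFindCountLoop (string sub : String) : Nat → Nat → Int → Nat
  | 0, n, _ => n
  | fuel + 1, n, i =>
    if i = -1 then n
    else pvFindCountLoop string sub fuel (n + 1) (PySem.Str.findFrom string sub (i + 1))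

def pvFindCount (string sub : String) : Nat :=
  pvFindCountLoop string sub (string.toList.length + 1) 0 (PySem.Str.find string sub)

def mom_and_dad_alt (string : String) : Bool :=
  pvFindCount string "mom" == pvFindCount string "dad"

-- ===== PRECONDITION & SPEC =====
def Spec_mom_and_dad (string : String) (out : Bool) : Prop := out = mom_and_dad_alt string
instance (string : String) (out : Bool) : Decidable (Spec_mom_and_dad string out) := by unfold Spec_mom_and_dad; infer_instance

-- ===== CLAIM (what is proved, stated in full; the proofs are below) =====
def Claim_equal_mom_and_dad : Prop := ∀ (string : String), Dom_mom_and_dad string → Spec_mom_and_dad string (mom_and_dad string)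

-- ===== LEMMAS AND PROOFS =====

-- number of (overlapping) occurrence positions of sub in l
def pvOcc (sub : List Char) : List Char → Nat
  | [] => 0
  | h :: t => (if sub.isPrefixOf (h :: t) then 1 else 0) + pvOcc sub t

lemma pvOcc_eq_countP (sub : List Char) (l : List Char) :
    pvOcc sub l = (List.range l.length).countP (fun m => sub.isPrefixOf (l.drop m)) := by
  induction l with
  | nil => simp [pvOcc]
  | cons h t ih =>
    have hcp : List.countP ((fun m => sub.isPrefixOf (List.drop m (h :: t))) ∘ Nat.succ) (List.range t.length)
        = List.countP (fun m => sub.isPrefixOf (List.drop m t)) (List.range t.length) :=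
      List.countP_congr (fun m _ => by simp [Function.comp])
    simp only [pvOcc, List.length_cons, List.range_succ_eq_map, List.countP_cons, List.countP_map,
      List.drop_zero]
    rw [ih, hcp]
    exact Nat.add_comm _ _

lemma pv_no_match_of_short (sub l : List Char) (m : Nat) (h : l.length < m + sub.length) (hs : sub ≠ []) :
    ¬ sub.isPrefixOf (l.drop m) = true := by
  intro hp
  rw [List.isPrefixOf_iff_prefix] at hp
  have := hp.length_le
  rw [List.length_drop] at this
  have hpos : 0 < sub.length := List.length_pos_iff.mpr hs
  omega

lemma pvOcc_drop_succ (sub l : List Char) (m : Nat) (h : m < l.length) :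
    pvOcc sub (l.drop m) = (if sub.isPrefixOf (l.drop m) then 1 else 0) + pvOcc sub (l.drop (m + 1)) := by
  rw [List.drop_eq_getElem_cons h]
  simp [pvOcc]

lemma pvOcc_drop_of_no_match (sub l : List Char) (i d : Nat)
    (hle : i + d ≤ l.length)
    (hno : ∀ m : Nat, i ≤ m → m < i + d → ¬ sub.isPrefixOf (l.drop m) = true) :
    pvOcc sub (l.drop i) = pvOcc sub (l.drop (i + d)) := by
  induction d generalizing i with
  | zero => rfl
  | succ d ih =>
    have hi : i < l.length := by omega
    rw [pvOcc_drop_succ sub l i hi]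
    rw [if_neg (hno i le_rfl (by omega))]
    have heq : i + 1 + d = i + (d + 1) := by omega
    have := ih (i + 1) (by omega) (fun m h1 h2 => hno m (by omega) (by omega))
    rw [heq] at this
    omega

lemma pv_go_spec (sub : List Char) (hs : sub ≠ []) :
    ∀ (l : List Char) (k : Nat),
      (PySem.Chars.find.go sub l k = -1 ∧ pvOcc sub l = 0) ∨
      (∃ j : Nat, PySem.Chars.find.go sub l k = ((k + j : Nat) : Int) ∧
        sub.isPrefixOf (l.drop j) = true ∧ ∀ m : Nat, m < j → ¬ sub.isPrefixOf (l.drop m) = true) := by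
  intro l
  induction l with
  | nil =>
    intro k
    left
    rw [PySem.Chars.find.go.eq_1]
    simp [pvOcc, List.isEmpty_iff, hs]
  | cons h t ih =>
    intro k
    rw [PySem.Chars.find.go.eq_2]
    by_cases hp : sub.isPrefixOf (h :: t) = true
    · right
      exact ⟨0, by simp [hp], by simpa using hp, by omega⟩
    · rw [if_neg hp]
      rcases ih (k + 1) with ⟨hgo, hocc⟩ | ⟨j, hgo, hmatch, hmin⟩
      · left
        refine ⟨hgo, ?_⟩
        simp [pvOcc, hp, hocc]
      · right
        refine ⟨j + 1, by rw [hgo]; push_cast; ring, by simpa using hmatch, ?_⟩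
        intro m hm
        match m with
        | 0 => simpa using hp
        | m + 1 => simpa using hmin m (by omega)

lemma pv_findFrom_cases (s sub : String) (hs : sub.toList ≠ []) (i : Nat) (hi : i ≤ s.toList.length) :
    (PySem.Str.findFrom s sub (i : Int) = -1 ∧ pvOcc sub.toList (s.toList.drop i) = 0) ∨
    (∃ j : Nat, PySem.Str.findFrom s sub (i : Int) = (j : Int) ∧ i ≤ j ∧
      sub.toList.isPrefixOf (s.toList.drop j) = true ∧
      ∀ m : Nat, i ≤ m → m < j → ¬ sub.toList.isPrefixOf (s.toList.drop m) = true) := by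
  have hst : ¬ ((i : Int) < 0) := by omega
  rw [PySem.Str.findFrom]
  rw [PySem.Chars.findFrom]
  simp only [if_neg hst, Int.toNat_natCast, List.take_length]
  rw [if_neg (show ¬ ((s.toList.length : Int) < (i : Int)) by exact_mod_cast not_lt.mpr hi)]
  rw [PySem.Chars.find]
  rcases pv_go_spec sub.toList hs (s.toList.drop i) 0 with ⟨hgo, hocc⟩ | ⟨j', hgo, hmatch, hmin⟩
  · left
    rw [hgo]
    simp [hocc]
  · right
    refine ⟨i + j', ?_, by omega, ?_, ?_⟩
    · rw [hgo]
      rw [if_neg (by simp)]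
      push_cast
      ring
    · rw [List.drop_drop] at hmatch
      exact hmatch
    · intro m him hmj
      have := hmin (m - i) (by omega)
      rw [List.drop_drop] at this
      rw [show i + (m - i) = m by omega] at this
      exact this

lemma pv_find_eq_findFrom_zero (s sub : String) :
    PySem.Str.find s sub = PySem.Str.findFrom s sub 0 := by
  rw [PySem.Str.findFrom, PySem.Chars.findFrom, PySem.Str.find]
  simp only [show ¬ ((0:Int) < 0) by omega, if_false, Int.toNat_natCast, List.take_length,
    Int.toNat_zero, List.drop_zero]
  rw [if_neg (by omega)]
  by_cases h : PySem.Chars.find s.toList sub.toList = -1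
  · simp [h]
  · simp [h]

lemma pv_match_lt (sub l : List Char) (hs : sub ≠ []) (j : Nat)
    (h : sub.isPrefixOf (l.drop j) = true) : j < l.length := by
  by_contra hc
  rw [List.drop_eq_nil_of_le (by omega)] at h
  rcases sub with _ | ⟨a, t⟩
  · exact hs rfl
  · simp [List.isPrefixOf] at h

lemma pv_loop_counts (s sub : String) (hs : sub.toList ≠ []) :
    ∀ (fuel i n : Nat), i ≤ s.toList.length → s.toList.length + 1 ≤ fuel + i →
      pvFindCountLoop s sub fuel n (PySem.Str.findFrom s sub (i : Int)) = n + pvOcc sub.toList (s.toList.drop i) := by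
  intro fuel
  induction fuel with
  | zero => intro i n h1 h2; omega
  | succ fuel ih =>
    intro i n h1 h2
    rcases pv_findFrom_cases s sub hs i h1 with ⟨hf, hocc⟩ | ⟨j, hf, hij, hmatch, hmin⟩
    · rw [hf]
      simp [pvFindCountLoop, hocc]
    · rw [hf]
      have hjlen : j < s.toList.length := pv_match_lt sub.toList s.toList hs j hmatch
      rw [pvFindCountLoop]
      rw [if_neg (by omega)]
      rw [show (j : Int) + 1 = ((j + 1 : Nat) : Int) by push_cast; ring]
      rw [ih (j + 1) (n + 1) (by omega) (by omega)]
      have hskip := pvOcc_drop_of_no_match sub.toList s.toList i (j - i) (by omega)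
        (fun m hm1 hm2 => hmin m hm1 (by omega))
      rw [show i + (j - i) = j by omega] at hskip
      rw [hskip, pvOcc_drop_succ sub.toList s.toList j hjlen, if_pos hmatch]
      omega

lemma pvFindCount_eq_occ (s sub : String) (hs : sub.toList ≠ []) :
    pvFindCount s sub = pvOcc sub.toList s.toList := by
  rw [pvFindCount, pv_find_eq_findFrom_zero]
  rw [show (0 : Int) = ((0 : Nat) : Int) by rfl]
  rw [pv_loop_counts s sub hs (s.toList.length + 1) 0 0 (by omega) (by omega)]
  simp

lemma pv_fold_pair (L : List Int) (P Q : Int → Prop) [DecidablePred P] [DecidablePred Q] (d m : Int) :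
    L.foldl (fun (acc : Int × Int) i =>
        if P i then (acc.1, acc.2 + 1)
        else if Q i then (acc.1 + 1, acc.2)
        else acc) (d, m)
      = (d + L.countP (fun i => decide (¬ P i ∧ Q i)), m + L.countP (fun i => decide (P i))) := by
  induction L generalizing d m with
  | nil => simp
  | cons x t ih =>
    simp only [List.foldl_cons, List.countP_cons]
    by_cases hP : P x
    · rw [if_pos hP, ih]
      simp only [hP, decide_true, not_true_eq_false, false_and, decide_false, Prod.mk.injEq]
      constructor <;> push_cast <;> ring
    · rw [if_neg hP]
      by_cases hQ : Q x
      · rw [if_pos hQ, ih]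
        simp only [hP, hQ, decide_true, decide_false, not_false_eq_true, true_and, Prod.mk.injEq]
        constructor <;> push_cast <;> ring
      · rw [if_neg hQ, ih]
        simp [hP, hQ]

lemma pv_window_iff (l : List Char) (a b c : Char) (m : Nat) (h : m + 2 < l.length) :
    ((PySem.Chars.pyGet? l (m : Int)).toList ++ (PySem.Chars.pyGet? l ((m : Int) + 1)).toList
        ++ (PySem.Chars.pyGet? l ((m : Int) + 2)).toList = [a, b, c])
      ↔ [a, b, c].isPrefixOf (l.drop m) = true := by
  have h0 : PySem.Chars.pyGet? l (m : Int) = some l[m] := by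
    rw [PySem.Chars.pyGet?, PySem.List.pyGet?_natCast, List.getElem?_eq_getElem (by omega)]
  have h1 : PySem.Chars.pyGet? l ((m : Int) + 1) = some l[m + 1] := by
    rw [show (m : Int) + 1 = ((m + 1 : Nat) : Int) by push_cast; ring]
    rw [PySem.Chars.pyGet?, PySem.List.pyGet?_natCast, List.getElem?_eq_getElem (by omega)]
  have h2 : PySem.Chars.pyGet? l ((m : Int) + 2) = some l[m + 2] := by
    rw [show (m : Int) + 2 = ((m + 2 : Nat) : Int) by push_cast; ring]
    rw [PySem.Chars.pyGet?, PySem.List.pyGet?_natCast, List.getElem?_eq_getElem (by omega)]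
  rw [h0, h1, h2]
  have hd : l.drop m = l[m] :: l[m + 1] :: l[m + 2] :: l.drop (m + 3) := by
    rw [List.drop_eq_getElem_cons (by omega), List.drop_eq_getElem_cons (by omega),
      List.drop_eq_getElem_cons (by omega)]
  rw [hd]
  simp only [Option.toList_some, List.isPrefixOf, List.cons_append, List.nil_append,
    List.cons.injEq, and_true, Bool.and_eq_true, beq_iff_eq]
  tauto

lemma pv_countP_range_stable (f : Nat → Bool) (K n : Nat) (hK : K ≤ n)
    (hno : ∀ m : Nat, K ≤ m → ¬ f m = true) :
    (List.range n).countP f = (List.range K).countP f := by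
  induction n with
  | zero => have : K = 0 := by omega
            simp [this]
  | succ n ih =>
    by_cases hKn : K = n + 1
    · simp [hKn]
    · rw [List.range_succ, List.countP_append]
      rw [ih (by omega)]
      simp [hno n (by omega)]

lemma pv_countA (l : List Char) (a b c : Char) :
    (List.range ((l.length : Int) - 2).toNat).countP (fun m => [a, b, c].isPrefixOf (l.drop m))
      = pvOcc [a, b, c] l := by
  rw [pvOcc_eq_countP]
  refine (pv_countP_range_stable _ _ _ (by omega) ?_).symm
  intro m hm
  exact pv_no_match_of_short [a, b, c] l m (by simp; omega) (by simp)

-- A's countP over the index range equals the occurrence count, for a 3-char pattern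
lemma pv_A_count (s : String) (a b c : Char) :
    (PySem.List.pyRange 0 (PySem.Str.len s - 2) 1).countP
      (fun i => decide ((PySem.Str.pyGet? s i).toList ++ (PySem.Str.pyGet? s (i + 1)).toList
        ++ (PySem.Str.pyGet? s (i + 2)).toList = [a, b, c]))
      = pvOcc [a, b, c] s.toList := by
  rw [PySem.Str.len_eq, PySem.List.pyRange_one, List.countP_map]
  rw [show ((s.toList.length : Int) - 2 - 0).toNat = ((s.toList.length : Int) - 2).toNat by omega]
  rw [← pv_countA s.toList a b c]
  apply List.countP_congr
  intro m hm
  rw [List.mem_range] at hm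
  have hlt : m + 2 < s.toList.length := by omega
  simp only [Function.comp, zero_add, PySem.Str.pyGet?, decide_eq_true_eq]
  rw [pv_window_iff s.toList a b c m hlt]

-- ===== VERDICT (by name: the statement is the Claim_ definition above) =====
theorem mom_and_dad_spec : Claim_equal_mom_and_dad := by
  intro s _
  unfold Spec_mom_and_dad
  have hB : mom_and_dad_alt s = (pvOcc ['m','o','m'] s.toList == pvOcc ['d','a','d'] s.toList) := by
    rw [mom_and_dad_alt, pvFindCount_eq_occ s "mom" (by decide), pvFindCount_eq_occ s "dad" (by decide)]
    rfl
  have hA : mom_and_dad s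
      = (if ((pvOcc ['d','a','d'] s.toList : Int)) = ((pvOcc ['m','o','m'] s.toList : Int)) then true else false) := by
    rw [mom_and_dad]
    rw [pv_fold_pair (PySem.List.pyRange 0 (PySem.Str.len s - 2) 1)
      (fun i => (PySem.Str.pyGet? s i).toList ++ (PySem.Str.pyGet? s (i + 1)).toList
        ++ (PySem.Str.pyGet? s (i + 2)).toList = ['m','o','m'])
      (fun i => (PySem.Str.pyGet? s i).toList ++ (PySem.Str.pyGet? s (i + 1)).toList
        ++ (PySem.Str.pyGet? s (i + 2)).toList = ['d','a','d']) 0 0]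
    have hdadP : (PySem.List.pyRange 0 (PySem.Str.len s - 2) 1).countP
        (fun i => decide (¬ ((PySem.Str.pyGet? s i).toList ++ (PySem.Str.pyGet? s (i + 1)).toList
          ++ (PySem.Str.pyGet? s (i + 2)).toList = ['m','o','m'])
          ∧ (PySem.Str.pyGet? s i).toList ++ (PySem.Str.pyGet? s (i + 1)).toList
          ++ (PySem.Str.pyGet? s (i + 2)).toList = ['d','a','d']))
        = pvOcc ['d','a','d'] s.toList := by
      rw [← pv_A_count s 'd' 'a' 'd']
      apply List.countP_congr
      intro i _
      simp only [decide_eq_true_eq]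
      constructor
      · intro h; exact h.2
      · intro h
        refine ⟨?_, h⟩
        rw [h]
        simp
    rw [hdadP, pv_A_count s 'm' 'o' 'm']
    simp
  rw [hA, hB]
  by_cases h : pvOcc ['d','a','d'] s.toList = pvOcc ['m','o','m'] s.toList
  · simp [h]
  · rw [if_neg (by exact_mod_cast h)]
    have : ¬ (pvOcc ['m','o','m'] s.toList = pvOcc ['d','a','d'] s.toList) := fun hc => h hc.symm
    simp [this]
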